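-- pv_equiv track=rewrite | github.com/Nikikapralov/Bioinformatics | Specialisation/Finding hidden messages in DNA/Week 1/clump_finding/efficient_clump_finding.py | build_k_mer_frequency_dict
-- ===== SOURCE A (Python) =====
-- k = 9
--
-- def build_k_mer_frequency_dict(genome):
--     k_mers = {}
--     for i in range(len(genome) - k):
--         current_k_mer = genome[i:i+k]
--         if current_k_mer not in k_mers:
--             k_mers[current_k_mer] = [i]
--         else:
--             k_mers[current_k_mer].append(i)
--     return k_mers
-- ===== SOURCE B (Python) =====
-- k = 9
--
-- def build_k_mer_frequency_dict(genome):
--     n = len(genome) - k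
--     result = {}
--     for i in range(n):
--         km = genome[i:i+k]
--         if km not in result:
--             result[km] = [j for j in range(n) if genome[j:j+k] == km]
--     return result
-- ===== Notes on version B (the rewrite author's own statement) =====
-- stated objective: alternative
-- what changed: Replaces A's incremental dict accumulation (append position to a growing list per k-mer) with a first-occurrence dedup pass that, for each new k-mer, computes its complete position list in one comprehension scan over all windows.
import Mathlib
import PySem

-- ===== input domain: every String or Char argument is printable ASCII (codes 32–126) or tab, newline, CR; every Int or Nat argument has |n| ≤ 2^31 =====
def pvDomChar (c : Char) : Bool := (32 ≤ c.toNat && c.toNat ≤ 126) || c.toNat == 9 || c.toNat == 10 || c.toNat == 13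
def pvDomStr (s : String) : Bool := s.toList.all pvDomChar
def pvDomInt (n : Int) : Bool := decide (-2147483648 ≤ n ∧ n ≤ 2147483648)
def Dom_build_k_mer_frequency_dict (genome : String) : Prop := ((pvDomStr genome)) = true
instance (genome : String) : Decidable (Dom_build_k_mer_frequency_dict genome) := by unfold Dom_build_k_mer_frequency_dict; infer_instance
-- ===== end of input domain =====

-- B replaces A's incremental per-key list accumulation by a dedup-then-scan pass (alternative decomposition, not faster).

-- ===== PORT A =====
def build_k_mer_frequency_dict (genome : String) : List (String × List Int) :=
  ((PySem.List.pyRange 0 (PySem.Str.len genome - 9) 1).foldl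
    (fun d i =>
      let current_k_mer := PySem.Str.slice genome (some i) (some (i + 9))
      if d.contains current_k_mer = false then d.insert current_k_mer [i]
      else d.modify current_k_mer [] (fun v => v ++ [i]))
    PySem.Dict.empty).items

-- ===== PORT B =====
def build_k_mer_frequency_dict_alt (genome : String) : List (String × List Int) :=
  let n : Int := PySem.Str.len genome - 9
  ((PySem.List.pyRange 0 n 1).foldl
    (fun d i =>
      let km := PySem.Str.slice genome (some i) (some (i + 9))
      if d.contains km then d
      else d.insert km ((PySem.List.pyRange 0 n 1).filter
        (fun j => PySem.Str.slice genome (some j) (some (j + 9)) == km)))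
    PySem.Dict.empty).items

-- ===== PRECONDITION & SPEC =====
def Spec_build_k_mer_frequency_dict (genome : String) (out : List (String × List Int)) : Prop := out = build_k_mer_frequency_dict_alt genome
instance (genome : String) (out : List (String × List Int)) : Decidable (Spec_build_k_mer_frequency_dict genome out) := by unfold Spec_build_k_mer_frequency_dict; infer_instance

-- ===== CLAIM (what is proved, stated in full; the proofs are below) =====
def Claim_equal_build_k_mer_frequency_dict : Prop := ∀ (genome : String), Dom_build_k_mer_frequency_dict genome → Spec_build_k_mer_frequency_dict genome (build_k_mer_frequency_dict genome)

-- ===== LEMMAS AND PROOFS =====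

-- the k-mer starting at index i (shared shape of both ports)
def pvKey (genome : String) (i : Int) : String := PySem.Str.slice genome (some i) (some (i + 9))

-- distinct elements of the second list not in `seen`, in first-occurrence order
def pvFresh (seen : List String) : List String → List String
  | [] => []
  | c :: l => if seen.contains c then pvFresh seen l else c :: pvFresh (seen ++ [c]) l

theorem pvFresh_update (l : List String) : ∀ (seen : List String),
    List.foldl PySem.Set.add seen l = seen ++ pvFresh seen l := by
  induction l with
  | nil => intro seen; simp [pvFresh]
  | cons c l ih =>
    intro seen
    by_cases h : c ∈ seen
    · simp [pvFresh, PySem.Set.add, h, ih]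
    · simp [pvFresh, PySem.Set.add, h, ih]

theorem pv_contains_map_fst (d : PySem.Dict String (List Int)) (c : String) :
    (d.items.map (fun p => p.1)).contains c = d.contains c := by
  simp [PySem.Dict.contains, List.any_eq, List.mem_map]

theorem pv_foldB (v : String → List Int) : ∀ (l : List String) (d : PySem.Dict String (List Int)),
    (l.foldl (fun d c => if d.contains c then d else d.insert c (v c)) d).items
      = d.items ++ (pvFresh (d.items.map (fun p => p.1)) l).map (fun c => (c, v c)) := by
  intro l
  induction l with
  | nil => intro d; simp [pvFresh]
  | cons c l ih =>
    intro d
    by_cases h : d.contains c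
    · simp only [List.foldl_cons, h, if_true, ih, pvFresh, pv_contains_map_fst]
    · have hf : d.contains c = false := by simpa using h
      simp only [List.foldl_cons, hf, if_false, Bool.false_eq_true, ih, pvFresh,
        pv_contains_map_fst, PySem.Dict.items_insert_of_not_contains d (v c) hf]
      simp

theorem pv_A_items (genome : String) :
    build_k_mer_frequency_dict genome
      = (PySem.Set.ofList ((PySem.List.pyRange 0 (PySem.Str.len genome - 9) 1).map (pvKey genome))).map
          (fun c => (c, (PySem.List.pyRange 0 (PySem.Str.len genome - 9) 1).filter (fun i => pvKey genome i == c))) := by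
  set R := PySem.List.pyRange 0 (PySem.Str.len genome - 9) 1 with hR
  have hstep : (fun (d : PySem.Dict String (List Int)) (i : Int) =>
      let current_k_mer := PySem.Str.slice genome (some i) (some (i + 9))
      if d.contains current_k_mer = false then d.insert current_k_mer [i]
      else d.modify current_k_mer [] (fun v => v ++ [i]))
      = (fun d i => d.modify (pvKey genome i) [] (fun v => v ++ [i])) := by
    funext d i
    by_cases h : d.contains (PySem.Str.slice genome (some i) (some (i + 9)))
    · simp [pvKey, h]
    · have hf : d.contains (PySem.Str.slice genome (some i) (some (i + 9))) = false := by simpa using h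
      simp [pvKey, hf, PySem.Dict.modify, PySem.Dict.getD_of_not_contains _ _ hf]
  have hnodup : (R.foldl (fun d i => d.modify (pvKey genome i) [] (fun v => v ++ [i])) PySem.Dict.empty).keys.Nodup :=
    PySem.Dict.nodup_keys_foldl_modify_key R (pvKey genome) [] (fun _ i v => v ++ [i]) PySem.Dict.empty (by simp [PySem.Dict.empty, PySem.Dict.keys])
  have hkeys : (R.foldl (fun d i => d.modify (pvKey genome i) [] (fun v => v ++ [i])) PySem.Dict.empty).keys
      = PySem.Set.ofList (R.map (pvKey genome)) :=
    PySem.Dict.keys_foldl_modify_key R (pvKey genome) [] (fun _ i v => v ++ [i]) PySem.Dict.empty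
  have hgetD : ∀ c, (R.foldl (fun d i => d.modify (pvKey genome i) [] (fun v => v ++ [i])) PySem.Dict.empty).getD c []
      = R.filter (fun i => pvKey genome i == c) := by
    intro c
    have hmap : R.foldl (fun d i => d.modify (pvKey genome i) [] (fun v => v ++ [i])) PySem.Dict.empty
        = (R.map (fun i => (pvKey genome i, i))).foldl (fun d p => d.modify p.1 [] (fun v => v ++ [p.2])) PySem.Dict.empty := by
      rw [List.foldl_map]
    rw [hmap, PySem.Dict.getD_foldl_modify_append]
    simp [List.filter_map, List.map_map, Function.comp_def, PySem.Dict.getD_empty]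
  unfold build_k_mer_frequency_dict
  rw [show (fun (d : PySem.Dict String (List Int)) (i : Int) =>
      let current_k_mer := PySem.Str.slice genome (some i) (some (i + 9))
      if d.contains current_k_mer = false then d.insert current_k_mer [i]
      else d.modify current_k_mer [] (fun v => v ++ [i]))
      = (fun d i => d.modify (pvKey genome i) [] (fun v => v ++ [i])) from hstep]
  rw [PySem.Dict.items_eq_map_keys _ hnodup [], hkeys]
  exact List.map_congr_left (fun c _ => by rw [hgetD c])

theorem pv_B_items (genome : String) :
    build_k_mer_frequency_dict_alt genome
      = (pvFresh [] ((PySem.List.pyRange 0 (PySem.Str.len genome - 9) 1).map (pvKey genome))).map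
          (fun c => (c, (PySem.List.pyRange 0 (PySem.Str.len genome - 9) 1).filter (fun i => pvKey genome i == c))) := by
  have hmap : (PySem.List.pyRange 0 (PySem.Str.len genome - 9) 1).foldl
        (fun (d : PySem.Dict String (List Int)) (i : Int) =>
          let km := PySem.Str.slice genome (some i) (some (i + 9))
          if d.contains km then d
          else d.insert km ((PySem.List.pyRange 0 (PySem.Str.len genome - 9) 1).filter
            (fun j => PySem.Str.slice genome (some j) (some (j + 9)) == km)))
        PySem.Dict.empty
      = ((PySem.List.pyRange 0 (PySem.Str.len genome - 9) 1).map (pvKey genome)).foldl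
          (fun d c => if d.contains c then d
            else d.insert c ((PySem.List.pyRange 0 (PySem.Str.len genome - 9) 1).filter
              (fun i => pvKey genome i == c))) PySem.Dict.empty := by
    rw [List.foldl_map]; rfl
  show ((PySem.List.pyRange 0 (PySem.Str.len genome - 9) 1).foldl
        (fun (d : PySem.Dict String (List Int)) (i : Int) =>
          let km := PySem.Str.slice genome (some i) (some (i + 9))
          if d.contains km then d
          else d.insert km ((PySem.List.pyRange 0 (PySem.Str.len genome - 9) 1).filter
            (fun j => PySem.Str.slice genome (some j) (some (j + 9)) == km)))
        PySem.Dict.empty).items = _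
  rw [hmap, pv_foldB]
  simp [PySem.Dict.empty]

-- ===== VERDICT (by name: the statement is the Claim_ definition above) =====
theorem build_k_mer_frequency_dict_spec : Claim_equal_build_k_mer_frequency_dict := by
  intro genome _
  unfold Spec_build_k_mer_frequency_dict
  rw [pv_A_items, pv_B_items]
  have h := pvFresh_update ((PySem.List.pyRange 0 (PySem.Str.len genome - 9) 1).map (pvKey genome)) []
  simp only [List.nil_append] at h
  rw [show PySem.Set.ofList ((PySem.List.pyRange 0 (PySem.Str.len genome - 9) 1).map (pvKey genome))
      = pvFresh [] ((PySem.List.pyRange 0 (PySem.Str.len genome - 9) 1).map (pvKey genome)) from h]
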